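-- pv_equiv track=rewrite | github.com/mhleemuseblossom/leak-detector | backend/crawler.py | _filter_relevant_links
-- ===== SOURCE A (Python) =====
-- def _filter_relevant_links(links: list[str], keyword: str) -> list[str]:
--     """키워드 관련성 기반 링크 필터링"""
--     kw_tokens = keyword.lower().split()
--     scored = []
--     for link in links:
--         score = 0
--         url_lower = link.lower()
--         for token in kw_tokens:
--             if token in url_lower:
--                 score += 2
--         # 의심 패턴 가중치
--         suspicious = ["leak", "dump", "data", "db", "pass", "crack", "hack", "breach", "expose", "secret"]
--         for s in suspicious:
--             if s in url_lower:
--                 score += 1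
--         if score > 0:
--             scored.append((score, link))
--
--     scored.sort(reverse=True)
--     # 점수 없어도 일부 포함
--     result = [l for _, l in scored]
--     non_scored = [l for l in links if l not in result]
--     return result + non_scored[:2]
-- ===== SOURCE B (Python) =====
-- SUSPICIOUS = ["leak", "dump", "data", "db", "pass", "crack", "hack", "breach", "expose", "secret"]
--
--
-- def _filter_relevant_links(links: list[str], keyword: str) -> list[str]:
--     """Online insertion sort: keep `ranked` sorted descending while scanning once;
--     cap the zero-score extras at two during the same pass (no sort() call, no rescan)."""
--     kw_tokens = keyword.lower().split()
--     ranked = []   # (score, link) pairs, kept in descending lexicographic order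
--     extras = []   # first (at most) two zero-score links, in input order
--     for link in links:
--         u = link.lower()
--         score = 2 * sum(t in u for t in kw_tokens) + sum(s in u for s in SUSPICIOUS)
--         if score > 0:
--             i = 0
--             while i < len(ranked) and (score, link) <= ranked[i]:
--                 i += 1
--             ranked.insert(i, (score, link))
--         elif len(extras) < 2:
--             extras.append(link)
--     return [l for _, l in ranked] + extras
-- ===== Notes on version B (the rewrite author's own statement) =====
-- stated objective: alternative
-- what changed: B is a single online pass: each positive-score link is inserted at its place in an always-sorted descending list (online insertion sort, no sort() call) and at most two zero-score extras are collected during the same pass, eliminating A's post-hoc list.sort and its O(n^2) 'l not in result' string-list membership rescan over links.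
import Mathlib
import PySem

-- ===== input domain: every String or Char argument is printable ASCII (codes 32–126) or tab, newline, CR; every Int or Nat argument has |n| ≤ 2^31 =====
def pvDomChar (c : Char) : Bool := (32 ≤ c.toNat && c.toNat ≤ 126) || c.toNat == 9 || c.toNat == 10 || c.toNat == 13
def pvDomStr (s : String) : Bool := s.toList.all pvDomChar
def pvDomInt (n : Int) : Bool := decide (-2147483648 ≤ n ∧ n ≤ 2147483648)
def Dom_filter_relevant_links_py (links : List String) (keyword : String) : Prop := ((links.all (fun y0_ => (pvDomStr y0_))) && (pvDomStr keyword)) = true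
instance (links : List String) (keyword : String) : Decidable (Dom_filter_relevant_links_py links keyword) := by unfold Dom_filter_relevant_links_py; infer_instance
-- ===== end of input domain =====

-- B replaces A's collect-then-sort-then-membership-rescan by a single online pass that keeps the
-- ranked list sorted descending by insertion and caps the zero-score extras at two as it scans
-- (objective: alternative; return values proved equal).

-- the suspicious-pattern list (a literal in both Pythons)
def pvSuspicious : List String :=
  ["leak", "dump", "data", "db", "pass", "crack", "hack", "breach", "expose", "secret"]

-- ===== PORT A =====
def filter_relevant_links_py (links : List String) (keyword : String) : List String :=
  let kw_tokens := PySem.Str.split₀ (PySem.Str.lower keyword)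
  let scored := links.foldl (fun scored link =>
    let url_lower := PySem.Str.lower link
    let score : Int :=
      kw_tokens.foldl (fun sc token => if PySem.Str.isIn token url_lower then sc + 2 else sc) 0
    let score :=
      pvSuspicious.foldl (fun sc s => if PySem.Str.isIn s url_lower then sc + 1 else sc) score
    if 0 < score then scored ++ [(score, link)] else scored) ([] : List (Int × String))
  let scored := PySem.List.sorted2 scored (fun p => p.1) (fun p => p.2) true
  let result := scored.map (fun p => p.2)
  let non_scored := links.filter (fun l => !(result.contains l))
  result ++ PySem.List.slice non_scored none (some 2)

-- ===== PORT B =====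
-- Source B's while-and-insert: walk past every y with (score, link) <= y (Python tuple <=), insert there
def pvInsertDesc (x : Int × String) : List (Int × String) → List (Int × String)
  | [] => [x]
  | y :: ys =>
      if decide (x.1 < y.1) || (x.1 == y.1 && decide (x.2 ≤ y.2)) then y :: pvInsertDesc x ys
      else x :: y :: ys

def filter_relevant_links_py_alt (links : List String) (keyword : String) : List String :=
  let kw_tokens := PySem.Str.split₀ (PySem.Str.lower keyword)
  let p := links.foldl (fun (acc : List (Int × String) × List String) link =>
    let u := PySem.Str.lower link
    let score : Int :=
      2 * (kw_tokens.countP (fun t => PySem.Str.isIn t u) : Int)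
        + (pvSuspicious.countP (fun s => PySem.Str.isIn s u) : Int)
    if 0 < score then (pvInsertDesc (score, link) acc.1, acc.2)
    else if acc.2.length < 2 then (acc.1, acc.2 ++ [link]) else acc)
    (([], []) : List (Int × String) × List String)
  p.1.map (fun q => q.2) ++ p.2

-- ===== PRECONDITION & SPEC =====
def Spec_filter_relevant_links_py (links : List String) (keyword : String) (out : List String) : Prop := out = filter_relevant_links_py_alt links keyword
instance (links : List String) (keyword : String) (out : List String) : Decidable (Spec_filter_relevant_links_py links keyword out) := by unfold Spec_filter_relevant_links_py; infer_instance

-- ===== CLAIM (what is proved, stated in full; the proofs are below) =====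
def Claim_equal_filter_relevant_links_py : Prop := ∀ (links : List String) (keyword : String), Dom_filter_relevant_links_py links keyword → Spec_filter_relevant_links_py links keyword (filter_relevant_links_py links keyword)

-- ===== LEMMAS AND PROOFS =====

-- the common per-link score, used only by the proofs
def pvScore (kw_tokens : List String) (link : String) : Int :=
  let u := PySem.Str.lower link
  2 * (kw_tokens.countP (fun t => PySem.Str.isIn t u) : Int)
    + (pvSuspicious.countP (fun s => PySem.Str.isIn s u) : Int)

-- A's token loop adds 2 per matching token
lemma pv_foldl_two (p : String → Bool) (xs : List String) (a : Int) :
    xs.foldl (fun sc t => if p t then sc + 2 else sc) a = a + 2 * (xs.countP p : Int) := by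
  induction xs generalizing a with
  | nil => simp
  | cons x xs ih =>
    by_cases h : p x
    · simp [h, ih]; ring
    · simp [h, ih]

-- A's two accumulator loops compute pvScore
lemma pv_scoreA_eq (kw_tokens : List String) (link : String) :
    pvSuspicious.foldl
        (fun sc s => if PySem.Str.isIn s (PySem.Str.lower link) then sc + 1 else sc)
        (kw_tokens.foldl
          (fun sc t => if PySem.Str.isIn t (PySem.Str.lower link) then sc + 2 else sc) 0)
      = pvScore kw_tokens link := by
  rw [PySem.List.foldl_count_if, pv_foldl_two, pvScore]
  ring

-- A's scored-list loop builds (score, link) for the positive-score links, in order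
lemma pv_scoredA_eq (kw_tokens : List String) (links : List String) :
    links.foldl (fun scored link =>
        let url_lower := PySem.Str.lower link
        let score : Int :=
          kw_tokens.foldl (fun sc token => if PySem.Str.isIn token url_lower then sc + 2 else sc) 0
        let score :=
          pvSuspicious.foldl (fun sc s => if PySem.Str.isIn s url_lower then sc + 1 else sc) score
        if 0 < score then scored ++ [(score, link)] else scored) ([] : List (Int × String))
      = ((links.filter (fun l => decide (0 < pvScore kw_tokens l))).map
          (fun l => (pvScore kw_tokens l, l))) := by
  have h := PySem.List.foldl_congr_mem links
    (fun scored link =>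
        let url_lower := PySem.Str.lower link
        let score : Int :=
          kw_tokens.foldl (fun sc token => if PySem.Str.isIn token url_lower then sc + 2 else sc) 0
        let score :=
          pvSuspicious.foldl (fun sc s => if PySem.Str.isIn s url_lower then sc + 1 else sc) score
        if 0 < score then scored ++ [(score, link)] else scored)
    (fun scored link =>
        if decide (0 < pvScore kw_tokens link) then scored ++ [(pvScore kw_tokens link, link)]
        else scored)
    ([] : List (Int × String))
    (by
      intro acc x _
      simp only [pv_scoreA_eq]
      by_cases h : 0 < pvScore kw_tokens x <;> simp [h])
  rw [h, PySem.List.foldl_append_if]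
  simp

-- a link of `links` is in A's `result` iff its score is positive
lemma pv_mem_result (kw_tokens : List String) (links : List String) (l : String)
    (hl : l ∈ links) :
    (l ∈ (PySem.List.sorted2
            ((links.filter (fun x => decide (0 < pvScore kw_tokens x))).map
              (fun x => (pvScore kw_tokens x, x)))
            (fun q => q.1) (fun q => q.2) true).map (fun q => q.2))
      ↔ decide (0 < pvScore kw_tokens l) = true := by
  rw [List.mem_map]
  constructor
  · rintro ⟨q, hq, rfl⟩
    have := (PySem.List.sorted2_perm _ _ _ _).mem_iff.mp hq
    rw [List.mem_map] at this
    rcases this with ⟨x, hx, rfl⟩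
    exact (List.mem_filter.mp hx).2
  · intro h
    refine ⟨(pvScore kw_tokens l, l), ?_, rfl⟩
    rw [(PySem.List.sorted2_perm _ _ _ _).mem_iff, List.mem_map]
    exact ⟨l, List.mem_filter.mpr ⟨hl, h⟩, rfl⟩

-- membership in `result` as a Bool, for the filter predicates
lemma pv_contains_eq (kt : List String) (links : List String) (l : String) (hl : l ∈ links) :
    ((PySem.List.sorted2
        ((links.filter (fun x => decide (0 < pvScore kt x))).map
          (fun x => (pvScore kt x, x)))
        (fun q => q.1) (fun q => q.2) true).map (fun q => q.2)).contains l
      = decide (0 < pvScore kt l) := by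
  by_cases h : 0 < pvScore kt l
  · rw [decide_eq_true h]
    exact List.contains_iff_mem.mpr ((pv_mem_result kt links l hl).mpr (decide_eq_true h))
  · rw [decide_eq_false h]
    have hn : l ∉ (PySem.List.sorted2
        ((links.filter (fun x => decide (0 < pvScore kt x))).map
          (fun x => (pvScore kt x, x)))
        (fun q => q.1) (fun q => q.2) true).map (fun q => q.2) := by
      intro hc
      exact h (of_decide_eq_true ((pv_mem_result kt links l hl).mp hc))
    simpa using hn

-- A's `non_scored` equals the zero-score links of `links`, in order
lemma pv_filter_eq (kt : List String) (links : List String) :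
    links.filter (fun l => !(((PySem.List.sorted2
        ((links.filter (fun x => decide (0 < pvScore kt x))).map
          (fun x => (pvScore kt x, x)))
        (fun q => q.1) (fun q => q.2) true).map (fun q => q.2)).contains l))
      = links.filter (fun l => !decide (0 < pvScore kt l)) := by
  apply List.filter_congr
  intro l hl
  rw [pv_contains_eq kt links l hl]

-- Source B's hand insertion IS insertBy with sorted2's reverse comparator (tuple keys)
lemma pv_insertDesc_eq (x : Int × String) (ys : List (Int × String)) :
    pvInsertDesc x ys
      = PySem.List.insertBy
          (fun a b => decide (b.1 < a.1) || (!decide (a.1 < b.1) && decide (b.2 < a.2))) x ys := by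
  induction ys with
  | nil => rfl
  | cons y ys ih =>
    simp only [pvInsertDesc, PySem.List.insertBy, ih]
    by_cases h1 : x.1 < y.1
    · simp [h1, not_lt_of_gt h1]
    · by_cases he : x.1 = y.1
      · by_cases h3 : x.2 ≤ y.2
        · simp [he, h3, not_lt_of_ge h3]
        · simp [he, h3, lt_of_not_ge h3]
      · have h2 : y.1 < x.1 := lt_of_le_of_ne (not_lt.mp h1) (Ne.symm he)
        simp [h1, he, h2]

-- folding Source B's insertion over a list IS sorted2 … true of that list
lemma pv_foldl_insertDesc (qs : List (Int × String)) :
    qs.foldl (fun acc q => pvInsertDesc q acc) []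
      = PySem.List.sorted2 qs (fun q => q.1) (fun q => q.2) true := by
  show _ = qs.foldl _ []
  apply PySem.List.foldl_congr_mem
  intro acc q _
  simp only [pv_insertDesc_eq]
  rfl

-- 'if len < 2: append' collects the first-two prefix
lemma pv_cap2 (xs : List String) (acc : List String) (h : acc.length ≤ 2) :
    xs.foldl (fun z l => if z.length < 2 then z ++ [l] else z) acc = (acc ++ xs).take 2 := by
  induction xs generalizing acc with
  | nil => simp [List.take_of_length_le h]
  | cons x xs ih =>
    by_cases h2 : acc.length < 2
    · rw [List.foldl_cons, if_pos h2, ih (acc ++ [x]) (by simp; omega)]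
      simp
    · have h2' : acc.length = 2 := by omega
      rw [List.foldl_cons, if_neg h2, ih acc h]
      rw [List.take_append_of_le_length (by omega), List.take_append_of_le_length (by omega)]

-- B's pair loop: first component = sorted2 of the scored pairs, second = first two zero-score links
lemma pv_foldB_eq (kt : List String) (links : List String) :
    links.foldl (fun (acc : List (Int × String) × List String) link =>
        let u := PySem.Str.lower link
        let score : Int :=
          2 * (kt.countP (fun t => PySem.Str.isIn t u) : Int)
            + (pvSuspicious.countP (fun s => PySem.Str.isIn s u) : Int)
        if 0 < score then (pvInsertDesc (score, link) acc.1, acc.2)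
        else if acc.2.length < 2 then (acc.1, acc.2 ++ [link]) else acc)
      (([], []) : List (Int × String) × List String)
      = (PySem.List.sorted2
           ((links.filter (fun l => decide (0 < pvScore kt l))).map
             (fun l => (pvScore kt l, l)))
           (fun q => q.1) (fun q => q.2) true,
         (links.filter (fun l => !decide (0 < pvScore kt l))).take 2) := by
  have h := PySem.List.foldl_congr_mem links
    (fun (acc : List (Int × String) × List String) link =>
        let u := PySem.Str.lower link
        let score : Int :=
          2 * (kt.countP (fun t => PySem.Str.isIn t u) : Int)
            + (pvSuspicious.countP (fun s => PySem.Str.isIn s u) : Int)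
        if 0 < score then (pvInsertDesc (score, link) acc.1, acc.2)
        else if acc.2.length < 2 then (acc.1, acc.2 ++ [link]) else acc)
    (fun (acc : List (Int × String) × List String) link =>
        ((if decide (0 < pvScore kt link) then pvInsertDesc (pvScore kt link, link) acc.1
          else acc.1),
         (if !decide (0 < pvScore kt link) then
            (if acc.2.length < 2 then acc.2 ++ [link] else acc.2) else acc.2)))
    (([], []) : List (Int × String) × List String)
    (by
      intro acc x _
      show (if 0 < pvScore kt x then (pvInsertDesc (pvScore kt x, x) acc.1, acc.2)
            else if acc.2.length < 2 then (acc.1, acc.2 ++ [x]) else acc) = _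
      by_cases h : 0 < pvScore kt x
      · simp [h]
      · by_cases h2 : acc.2.length < 2 <;> simp [h, h2])
  rw [h]
  have hp := PySem.List.foldl_prod_mk
    (fun (a : List (Int × String)) link =>
      if decide (0 < pvScore kt link) then pvInsertDesc (pvScore kt link, link) a else a)
    (fun (b : List String) link =>
      if !decide (0 < pvScore kt link) then (if b.length < 2 then b ++ [link] else b) else b)
    links ([] : List (Int × String)) ([] : List String)
  rw [hp]
  congr 1
  · rw [PySem.List.foldl_if_eq_foldl_filter, ← pv_foldl_insertDesc, List.foldl_map]
  · rw [PySem.List.foldl_if_eq_foldl_filter, pv_cap2 _ [] (by simp)]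
    simp

-- ===== VERDICT (by name: the statement is the Claim_ definition above) =====
set_option maxHeartbeats 1000000 in
theorem filter_relevant_links_py_spec : Claim_equal_filter_relevant_links_py := by
  intro links keyword _
  show filter_relevant_links_py links keyword = filter_relevant_links_py_alt links keyword
  unfold filter_relevant_links_py filter_relevant_links_py_alt
  simp only [pv_scoredA_eq, pv_foldB_eq]
  rw [pv_filter_eq, PySem.List.slice_to _ (by norm_num)]
  rfl
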